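-- pv_equiv track=rewrite | github.com/DurivetMatthias/advent-of-code-pyhton | 2024_day_04_star_2.py | rotate_grid_diagonal
-- ===== SOURCE A (Python) =====
-- def rotate_grid_diagonal(grid):
--     diagonal = []
--     height = len(grid)
--     width = max([len(row) for row in grid])
--     new_height = width + height - 1
--     new_width = width
--     for row_index in range(new_height):
--         row = []
--         for col_index in range(new_width):
--             if row_index - col_index >= 0 and row_index - col_index < height:
--                 row.append(grid[row_index - col_index][col_index])
--         diagonal.append(row)
--     return diagonal
-- ===== SOURCE B (Python) =====
-- def rotate_grid_diagonal(grid):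
--     height = len(grid)
--     width = max(len(row) for row in grid)
--     buckets = [[] for _ in range(width + height - 1)]
--     for r in reversed(range(height)):
--         row = grid[r]
--         for c in range(width):
--             buckets[r + c].append(row[c])
--     return buckets
-- ===== Notes on version B (the rewrite author's own statement) =====
-- stated objective: alternative
-- what changed: B makes one pass over the grid cells, scattering each character of row r (rows processed bottom-up) into a per-diagonal bucket list at index r+c, instead of A's gather loop that scans every column of every one of the H+W-1 diagonals with a bounds test.
import Mathlib
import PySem

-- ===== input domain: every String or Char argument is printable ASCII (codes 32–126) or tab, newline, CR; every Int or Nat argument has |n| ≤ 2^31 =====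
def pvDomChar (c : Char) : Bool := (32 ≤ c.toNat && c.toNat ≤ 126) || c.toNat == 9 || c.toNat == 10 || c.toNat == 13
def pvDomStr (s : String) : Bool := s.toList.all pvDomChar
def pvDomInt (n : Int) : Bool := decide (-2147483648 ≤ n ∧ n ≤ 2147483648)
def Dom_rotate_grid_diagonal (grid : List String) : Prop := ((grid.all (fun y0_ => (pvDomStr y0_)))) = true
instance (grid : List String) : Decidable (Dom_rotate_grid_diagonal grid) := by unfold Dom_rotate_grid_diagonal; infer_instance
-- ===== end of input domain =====

-- B scatters the grid cells row by row (bottom-up) into per-diagonal bucket lists instead of A's gather loop that scans every column of every diagonal with a bounds test (alternative decomposition).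


-- grid[r][c] as a one-character string (Python's str indexing); the "" defaults are only
-- reachable outside Pre_ (where Python raises IndexError).
def pvCell (grid : List String) (r c : Int) : String :=
  match PySem.Str.pyGet? (PySem.List.pyGetD grid r "") c with
  | some ch => String.ofList [ch]
  | none => ""

-- ===== PORT A =====
def rotate_grid_diagonal (grid : List String) : List (List String) :=
  let height : Int := grid.length
  let width : Int := (PySem.List.max? (grid.map (fun row => PySem.Str.len row)) (fun x => x)).getD 0
  let new_height : Int := width + height - 1
  let new_width : Int := width
  (PySem.List.pyRange 0 new_height 1).map (fun row_index =>
    (PySem.List.pyRange 0 new_width 1).foldl (fun row col_index =>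
      if 0 ≤ row_index - col_index ∧ row_index - col_index < height then
        row ++ [pvCell grid (row_index - col_index) col_index]
      else row) [])

-- ===== PORT B =====
-- inner loop of B: scatter column c of row r into the diagonal bucket r+c
def pvStep (grid : List String) (width : Int) (b : List (List String)) (r : Int) : List (List String) :=
  (PySem.List.pyRange 0 width 1).foldl
    (fun b c => b.modify (r + c).toNat (fun l => l ++ [pvCell grid r c])) b

def rotate_grid_diagonal_alt (grid : List String) : List (List String) :=
  let height : Int := grid.length
  let width : Int := (PySem.List.max? (grid.map (fun row => PySem.Str.len row)) (fun x => x)).getD 0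
  let buckets : List (List String) := (PySem.List.pyRange 0 (width + height - 1) 1).map (fun _ => [])
  ((PySem.List.pyRange 0 height 1).reverse).foldl (pvStep grid width) buckets

-- ===== PRECONDITION & SPEC =====
-- Pre_ excludes exactly the inputs where Python A raises: the empty grid (ValueError from max
-- of an empty sequence) and ragged grids (IndexError: every row is indexed at every column below width).
def Pre_rotate_grid_diagonal (grid : List String) : Prop :=
  grid ≠ [] ∧ ∀ s ∈ grid, PySem.Str.len s = PySem.Str.len (grid.headD "")
instance (grid : List String) : Decidable (Pre_rotate_grid_diagonal grid) := by
  unfold Pre_rotate_grid_diagonal; infer_instance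
def pvWitness_rotate_grid_diagonal : List String := ["ab", "cd"]

def Spec_rotate_grid_diagonal (grid : List String) (out : List (List String)) : Prop := out = rotate_grid_diagonal_alt grid
instance (grid : List String) (out : List (List String)) : Decidable (Spec_rotate_grid_diagonal grid out) := by unfold Spec_rotate_grid_diagonal; infer_instance

-- ===== CLAIM (what is proved, stated in full; the proofs are below) =====
def Claim_equal_rotate_grid_diagonal : Prop := ∀ (grid : List String), Dom_rotate_grid_diagonal grid → Pre_rotate_grid_diagonal grid → Spec_rotate_grid_diagonal grid (rotate_grid_diagonal grid)

-- ===== LEMMAS AND PROOFS =====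

-- the common closed form: diagonal d of the grid
def pvS (grid : List String) (H W d : Int) : List String :=
  (PySem.List.pyRange (max 0 (d - H + 1)) (min d (W - 1) + 1) 1).map (fun c => pvCell grid (d - c) c)

-- Filtering an interval predicate out of a unit-step range is the intersected range.
lemma filter_pyRange_interval (lo hi : Int) (n : Nat) : ∀ (a b : Int), (b - a).toNat = n →
    (PySem.List.pyRange a b 1).filter (fun c => decide (lo ≤ c ∧ c < hi))
      = PySem.List.pyRange (max a lo) (min b hi) 1 := by
  induction n with
  | zero =>
    intro a b h
    rw [PySem.List.pyRange_one_eq_nil (by omega), PySem.List.pyRange_one_eq_nil (by omega),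
      List.filter_nil]
  | succ n ih =>
    intro a b h
    have hab : a < b := by omega
    rw [PySem.List.pyRange_one_cons hab, List.filter_cons, ih (a + 1) b (by omega)]
    by_cases hc : lo ≤ a ∧ a < hi
    · have h1 : max a lo = a := by omega
      have h2 : max (a + 1) lo = a + 1 := by omega
      have h3 : a < min b hi := by omega
      simp only [hc, and_self, decide_true, if_true, h1, h2,
        PySem.List.pyRange_one_cons h3]
    · simp only [decide_eq_true_eq, hc, if_false]
      by_cases hlo : lo ≤ a
      · rw [PySem.List.pyRange_one_eq_nil (by omega), PySem.List.pyRange_one_eq_nil (by omega)]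
      · have : max (a + 1) lo = max a lo := by omega
        rw [this]

-- A equals the closed form (no precondition needed).
lemma portA_eq_S (grid : List String) :
    rotate_grid_diagonal grid =
      (PySem.List.pyRange 0
          (((PySem.List.max? (grid.map (fun row => PySem.Str.len row)) (fun x => x)).getD 0)
            + (grid.length : Int) - 1) 1).map
        (fun d => pvS grid (grid.length : Int)
          ((PySem.List.max? (grid.map (fun row => PySem.Str.len row)) (fun x => x)).getD 0) d) := by
  unfold rotate_grid_diagonal pvS
  simp only []
  refine List.map_congr_left (fun d _ => ?_)
  rw [PySem.List.foldl_append_ite, List.nil_append,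
    List.filter_congr (fun c _ => (by simp only [decide_eq_decide]; omega :
      decide (0 ≤ d - c ∧ d - c < (grid.length : Int))
        = decide ((d - (grid.length : Int) + 1) ≤ c ∧ c < d + 1))),
    filter_pyRange_interval _ _ _ 0 _ rfl]
  congr 2
  omega

-- under Pre_ the computed width is the (common) length of the first row
lemma width_eq (grid : List String) (h : Pre_rotate_grid_diagonal grid) :
    (PySem.List.max? (grid.map (fun row => PySem.Str.len row)) (fun x => x)).getD 0
      = PySem.Str.len (grid.headD "") := by
  obtain ⟨hne, hall⟩ := h
  cases hmax : PySem.List.max? (grid.map (fun row => PySem.Str.len row)) (fun x => x) with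
  | none =>
    exfalso
    rw [PySem.List.max?_eq_none_iff] at hmax
    exact hne (List.map_eq_nil_iff.mp hmax)
  | some m =>
    have hm := PySem.List.max?_mem hmax
    obtain ⟨row, hrow, hlen⟩ := List.mem_map.mp hm
    rw [Option.getD_some, ← hlen]
    exact hall row hrow

lemma pvStep_length (grid : List String) (width : Int) (b : List (List String)) (r : Int) :
    (pvStep grid width b r).length = b.length := by
  unfold pvStep
  generalize PySem.List.pyRange 0 width 1 = cs
  induction cs generalizing b with
  | nil => rfl
  | cons c cs ih => simp [List.foldl_cons, ih, List.length_modify]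

-- effect of the inner column loop on bucket d
lemma pvInner_get (grid : List String) (r : Int) (hr : 0 ≤ r) (n : Nat) :
    ∀ (k W' : Int), 0 ≤ k → (W' - k).toNat = n → ∀ (b : List (List String)) (d : Nat),
    ((PySem.List.pyRange k W' 1).foldl
        (fun b c => b.modify (r + c).toNat (fun l => l ++ [pvCell grid r c])) b)[d]? =
      (b[d]?).map (fun l =>
        if r + k ≤ (d : Int) ∧ (d : Int) < r + W'
        then l ++ [pvCell grid r ((d : Int) - r)]
        else l) := by
  induction n with
  | zero =>
    intro k W' hk hn b d
    rw [PySem.List.pyRange_one_eq_nil (by omega), List.foldl_nil]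
    cases b[d]? with
    | none => rfl
    | some l =>
      rw [Option.map_some]
      congr 1
      rw [if_neg (by omega)]
  | succ n ih =>
    intro k W' hk hn b d
    rw [PySem.List.pyRange_one_cons (by omega), List.foldl_cons,
      ih (k + 1) W' (by omega) (by omega), List.getElem?_modify]
    cases b[d]? with
    | none => rfl
    | some l =>
      simp only [Option.map_eq_map, Option.map_some]
      congr 1
      by_cases hdk : (r + k).toNat = d
      · rw [if_pos hdk, if_neg (by omega), if_pos (by omega),
          show ((d : Int) - r) = k by omega]
      · rw [if_neg hdk]
        by_cases hin : r + (k + 1) ≤ (d : Int) ∧ (d : Int) < r + W'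
        · rw [if_pos hin, if_pos (by omega)]
        · rw [if_neg hin, if_neg (by omega)]

lemma pvOuter_length (grid : List String) (width : Int) (rs : List Int)
    (b : List (List String)) :
    (rs.foldl (pvStep grid width) b).length = b.length := by
  induction rs generalizing b with
  | nil => rfl
  | cons r rs ih => rw [List.foldl_cons, ih, pvStep_length]

-- effect of processing rows m-1 … 0 (in that order) on bucket d
lemma pvOuter_get (grid : List String) (W : Int) (hW : 0 ≤ W) :
    ∀ (m : Nat) (b : List (List String)) (d : Nat),
    (((PySem.List.pyRange 0 (m : Int) 1).reverse).foldl (pvStep grid W) b)[d]? =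
      (b[d]?).map (fun l => l ++ pvS grid (m : Int) W (d : Int)) := by
  intro m
  induction m with
  | zero =>
    intro b d
    rw [PySem.List.pyRange_one_eq_nil (by omega), List.reverse_nil, List.foldl_nil]
    cases b[d]? with
    | none => rfl
    | some l =>
      rw [Option.map_some]
      congr 1
      unfold pvS
      rw [PySem.List.pyRange_one_eq_nil (by omega), List.map_nil, List.append_nil]
  | succ m ih =>
    intro b d
    rw [show ((m + 1 : Nat) : Int) = (m : Int) + 1 by push_cast; ring,
      PySem.List.pyRange_one_succ_right (by omega), List.reverse_append,
      List.reverse_singleton, List.singleton_append, List.foldl_cons,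
      ih (pvStep grid W b (m : Int)) d]
    unfold pvStep
    rw [pvInner_get grid (m : Int) (by omega) W.toNat 0 W (by omega) (by omega) b d]
    cases b[d]? with
    | none => rfl
    | some l =>
      simp only [Option.map_some]
      congr 1
      simp only [add_zero]
      by_cases hin : (m : Int) ≤ (d : Int) ∧ (d : Int) < (m : Int) + W
      · have hseg : pvS grid ((m : Int) + 1) W (d : Int)
            = pvCell grid (m : Int) ((d : Int) - m) :: pvS grid (m : Int) W (d : Int) := by
          conv_lhs => rw [pvS]
          rw [show max 0 ((d : Int) - ((m : Int) + 1) + 1) = (d : Int) - m by omega,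
            PySem.List.pyRange_one_cons (by omega)]
          simp only [List.map_cons]
          rw [show (d : Int) - ((d : Int) - m) = (m : Int) by omega]
          congr 1
          conv_rhs => rw [pvS]
          rw [show max 0 ((d : Int) - (m : Int) + 1) = (d : Int) - m + 1 by omega]
        rw [if_pos hin, hseg, List.append_assoc, List.singleton_append]
      · rw [if_neg hin]
        congr 1
        unfold pvS
        by_cases hdm : (d : Int) < m
        · rw [show max 0 ((d : Int) - ((m : Int) + 1) + 1) = 0 by omega,
            show max 0 ((d : Int) - (m : Int) + 1) = 0 by omega]
        · rw [PySem.List.pyRange_one_eq_nil (by omega), PySem.List.pyRange_one_eq_nil (by omega)]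

-- ===== VERDICT (by name: the statement is the Claim_ definition above) =====
theorem rotate_grid_diagonal_spec : Claim_equal_rotate_grid_diagonal := by
  intro grid _ hpre
  unfold Spec_rotate_grid_diagonal
  set W := (PySem.List.max? (grid.map (fun row => PySem.Str.len row)) (fun x => x)).getD 0 with hWdef
  have hWeq := width_eq grid hpre
  have hW0 : 0 ≤ W := by rw [hWdef, hWeq, PySem.Str.len_eq]; positivity
  rw [portA_eq_S]
  unfold rotate_grid_diagonal_alt
  simp only [← hWdef]
  set N : Int := W + (grid.length : Int) - 1 with hN
  set b0 : List (List String) := (PySem.List.pyRange 0 N 1).map (fun _ => []) with hb0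
  have hb0len : b0.length = N.toNat := by
    rw [hb0, List.length_map, PySem.List.length_pyRange_one]; congr 1; omega
  have hb0get : ∀ (d : Nat), d < N.toNat → b0[d]? = some [] := by
    intro d hd
    rw [hb0, List.getElem?_map, PySem.List.getElem?_pyRange_one, if_pos (by omega),
      Option.map_some]
  refine List.ext_getElem? (fun d => ?_)
  by_cases hd : d < N.toNat
  · rw [List.getElem?_map, PySem.List.getElem?_pyRange_one, if_pos (by omega), Option.map_some,
      pvOuter_get grid W hW0 grid.length b0 d, hb0get d hd,
      Option.map_some, List.nil_append, zero_add]
  · rw [List.getElem?_eq_none, List.getElem?_eq_none]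
    · rw [pvOuter_length, hb0len]; omega
    · rw [List.length_map, PySem.List.length_pyRange_one]; omega
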